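-- pv_equiv track=rewrite | github.com/jiushill/note | 自己写的工具/shellcode混淆/hx.py | xorens
-- ===== SOURCE A (Python) =====
-- def xorens(zui):
--     data=[x for x in range(0,99999)]
--     for l in zui:
--         for c in data:
--             a=int(c)
--             b=9
--             c=a^b
--             if c==int(ord(l)):
--                 yield (a,b)
-- ===== SOURCE B (Python) =====
-- def xorens(zui):
--     # Direct computation: c ^ 9 == ord(l) iff c == ord(l) ^ 9, so for each char
--     # emit (ord(l) ^ 9, 9) directly when that value lies in A's scan range.
--     for l in zui:
--         a = ord(l) ^ 9
--         if 0 <= a < 99999: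
--             yield (a, 9)
-- ===== Notes on version B (the rewrite author's own statement) =====
-- stated objective: faster
-- what changed: Instead of scanning all 99999 candidates per character, B computes the unique solution a = ord(l) ^ 9 in closed form (xor is an involution) and range-checks it.
import Mathlib
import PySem

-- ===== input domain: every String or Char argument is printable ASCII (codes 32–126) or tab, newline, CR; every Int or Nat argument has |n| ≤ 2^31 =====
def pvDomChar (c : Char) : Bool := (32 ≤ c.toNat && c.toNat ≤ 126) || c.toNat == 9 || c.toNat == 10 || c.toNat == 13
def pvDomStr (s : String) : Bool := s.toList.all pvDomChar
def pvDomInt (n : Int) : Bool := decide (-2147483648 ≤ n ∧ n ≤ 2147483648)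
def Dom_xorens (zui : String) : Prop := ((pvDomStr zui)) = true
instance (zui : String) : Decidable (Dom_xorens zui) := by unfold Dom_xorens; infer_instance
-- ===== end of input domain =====

-- B replaces A's per-character scan of 0..99998 with the closed form a = ord(l) XOR 9
-- (xor is an involution) plus a range check: asymptotically faster, same output.


-- ===== PORT A =====
-- data = list(range(0, 99999)); for l in zui: for c in data: a=c; b=9; c=a^b; if c==ord(l): yield (a,b)
def xorens (zui : String) : List (Int × Int) :=
  let data := PySem.List.pyRange 0 99999 1
  zui.toList.foldl (fun out l =>
    data.foldl (fun out2 c =>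
      let a := c
      let b : Int := 9
      let c2 := Int.xor a b          -- Int.xor is exact for Python's '^' on ints
      if c2 = ((l.toNat : Int)) then out2 ++ [(a, b)] else out2) out) []

-- ===== PORT B =====
-- for l in zui: a = ord(l) ^ 9; if 0 <= a < 99999: yield (a, 9)
def xorens_alt (zui : String) : List (Int × Int) :=
  zui.toList.flatMap (fun l =>
    let a : Int := Int.xor ((l.toNat : Int)) 9
    if 0 ≤ a ∧ a < 99999 then [(a, 9)] else [])

-- ===== PRECONDITION & SPEC =====
def Spec_xorens (zui : String) (out : List (Int × Int)) : Prop := out = xorens_alt zui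
instance (zui : String) (out : List (Int × Int)) : Decidable (Spec_xorens zui out) := by unfold Spec_xorens; infer_instance

-- ===== CLAIM (what is proved, stated in full; the proofs are below) =====
def Claim_equal_xorens : Prop := ∀ (zui : String), Dom_xorens zui → Spec_xorens zui (xorens zui)

-- ===== LEMMAS AND PROOFS =====

theorem xor_nine (m : Nat) : Int.xor (m : Int) 9 = ((m ^^^ 9 : Nat) : Int) := rfl

theorem range_filter_eq (n m : Nat) (h : m < n) :
    (List.range n).filter (fun k => decide (k = m)) = [m] := by
  induction n with
  | zero => omega
  | succ n ih =>
    rw [List.range_succ, List.filter_append]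
    by_cases hm : m = n
    · subst hm
      have : (List.range m).filter (fun k => decide (k = m)) = [] := by
        rw [List.filter_eq_nil_iff]
        intro a ha
        simp only [List.mem_range] at ha
        simp only [decide_eq_true_eq]
        omega
      simp [this]
    · have hlt : m < n := by omega
      have hnm : ¬ n = m := fun hh => hm hh.symm
      rw [ih hlt]
      simp [hnm]

theorem inner_fold (t : Nat) (ht : t < 128) (acc : List (Int × Int)) :
    (PySem.List.pyRange 0 99999 1).foldl (fun out2 c =>
        if Int.xor c 9 = ((t : Nat) : Int) then out2 ++ [(c, (9 : Int))] else out2) acc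
      = acc ++ [(((t ^^^ 9 : Nat) : Int), 9)] := by
  have hx : t ^^^ 9 < 99999 := by
    have := Nat.xor_lt_two_pow (n := 7) (x := t) (y := 9)
    omega
  rw [PySem.List.foldl_append_ite (p := fun c => Int.xor c 9 = ((t : Nat) : Int)) (f := fun c => (c, (9:Int)))]
  rw [PySem.List.pyRange_one, List.filter_map]
  have hp : ((fun c => decide (Int.xor c 9 = ((t : Nat) : Int))) ∘ (fun k : Nat => (0 : Int) + k))
      = (fun k : Nat => decide (k = t ^^^ 9)) := by
    funext k
    simp only [Function.comp, zero_add]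
    rw [xor_nine]
    have : ((k ^^^ 9 : Nat) : Int) = ((t : Nat) : Int) ↔ k = t ^^^ 9 := by
      rw [Int.natCast_inj]
      constructor
      · intro h; have := congrArg (· ^^^ 9) h; simpa [Nat.xor_xor_cancel_right] using this
      · intro h; subst h; simp [Nat.xor_xor_cancel_right]
    simp [this]
  rw [hp]
  have h99 : ((99999 - 0 : Int).toNat) = 99999 := by decide
  rw [h99, range_filter_eq 99999 (t ^^^ 9) hx]
  simp

theorem main_fold (ls : List Char) (h : ∀ l ∈ ls, pvDomChar l = true) (acc : List (Int × Int)) :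
    ls.foldl (fun out l =>
      (PySem.List.pyRange 0 99999 1).foldl (fun out2 c =>
        if Int.xor c 9 = ((l.toNat : Nat) : Int) then out2 ++ [(c, (9 : Int))] else out2) out) acc
    = acc ++ ls.flatMap (fun l =>
        let a : Int := Int.xor ((l.toNat : Int)) 9
        if 0 ≤ a ∧ a < 99999 then [(a, 9)] else []) := by
  induction ls generalizing acc with
  | nil => simp
  | cons l ls ih =>
    have hl : pvDomChar l = true := h l (List.mem_cons_self ..)
    have ht : l.toNat < 128 := by
      simp only [pvDomChar, Bool.or_eq_true, Bool.and_eq_true, decide_eq_true_eq, beq_iff_eq] at hl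
      omega
    have htx : l.toNat ^^^ 9 < 128 := Nat.xor_lt_two_pow (n := 7) (by omega) (by omega)
    simp only [List.foldl_cons, List.flatMap_cons]
    rw [inner_fold l.toNat ht acc, ih (fun x hx => h x (List.mem_cons_of_mem _ hx))]
    have h0 : (0:Int) ≤ Int.xor ((l.toNat : Int)) 9 := by
      rw [xor_nine]; exact Int.natCast_nonneg _
    have h1 : Int.xor ((l.toNat : Int)) 9 < 99999 := by
      rw [xor_nine]; exact_mod_cast htx.trans (by omega)
    have hb : (let a : Int := Int.xor ((l.toNat : Int)) 9;
        if 0 ≤ a ∧ a < 99999 then [(a, (9:Int))] else []) = [(((l.toNat ^^^ 9 : Nat) : Int), 9)] := by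
      simp only []
      rw [if_pos ⟨h0, h1⟩, xor_nine]
    rw [hb, List.append_assoc]

-- ===== VERDICT (by name: the statement is the Claim_ definition above) =====
theorem xorens_spec : Claim_equal_xorens := by
  intro zui hdom
  unfold Spec_xorens xorens xorens_alt
  have h : ∀ l ∈ zui.toList, pvDomChar l = true := by
    unfold Dom_xorens pvDomStr at hdom
    exact fun l hl => List.all_eq_true.mp hdom l hl
  simpa using main_fold zui.toList h []
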